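-- pv_equiv track=rewrite | github.com/EtienneR07/AdventOfCode | AdventOfCode2023/solvers/solver_day_7.py | get_hand_count
-- ===== SOURCE A (Python) =====
-- def get_hand_count(hand, count_check):
--     for _, c1 in enumerate(hand):
--         count = 0
--         for _, c2 in enumerate(hand):
--             if c1 == c2:
--                 count += 1
--         if count == count_check:
--             return True
--     return False
-- ===== SOURCE B (Python) =====
-- def get_hand_count(hand, count_check):
--     counts = {}
--     for c in hand:
--         counts[c] = counts.get(c, 0) + 1
--     return count_check in counts.values()
-- ===== Notes on version B (the rewrite author's own statement) =====
-- stated objective: faster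
-- what changed: Replaces the per-character rescan of the whole hand with a single frequency-map building pass followed by a membership test over the tallied counts.
import Mathlib
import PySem

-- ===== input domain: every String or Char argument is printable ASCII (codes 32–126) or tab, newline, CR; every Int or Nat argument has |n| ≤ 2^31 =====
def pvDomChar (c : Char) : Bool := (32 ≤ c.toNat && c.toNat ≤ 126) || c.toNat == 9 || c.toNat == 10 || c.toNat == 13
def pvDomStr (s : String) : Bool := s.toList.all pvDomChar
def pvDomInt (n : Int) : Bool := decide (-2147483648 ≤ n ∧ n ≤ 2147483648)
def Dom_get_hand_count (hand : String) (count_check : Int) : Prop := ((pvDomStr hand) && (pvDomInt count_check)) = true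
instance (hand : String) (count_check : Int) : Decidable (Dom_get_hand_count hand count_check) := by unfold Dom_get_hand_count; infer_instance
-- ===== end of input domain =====

-- B builds a frequency map of the hand in one pass and tests membership of count_check among its values, replacing A's per-character rescan of the whole hand.


-- ===== PORT A =====
def ghcInner (hand : List Char) (c1 : Char) : Int :=
  hand.foldl (fun count c2 => if c1 == c2 then count + 1 else count) 0

def ghcOuter (hand : List Char) (count_check : Int) : List Char → Bool
  | [] => false
  | c1 :: rest =>
    if ghcInner hand c1 == count_check then true else ghcOuter hand count_check rest

def get_hand_count (hand : String) (count_check : Int) : Bool :=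
  ghcOuter hand.toList count_check hand.toList

-- ===== PORT B =====
def get_hand_count_alt (hand : String) (count_check : Int) : Bool :=
  let counts : PySem.Dict Char Int :=
    hand.toList.foldl (fun d c => d.insert c (d.getD c 0 + 1)) PySem.Dict.empty
  counts.values.contains count_check

-- ===== PRECONDITION & SPEC =====
def Spec_get_hand_count (hand : String) (count_check : Int) (out : Bool) : Prop := out = get_hand_count_alt hand count_check
instance (hand : String) (count_check : Int) (out : Bool) : Decidable (Spec_get_hand_count hand count_check out) := by unfold Spec_get_hand_count; infer_instance

-- ===== CLAIM (what is proved, stated in full; the proofs are below) =====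
def Claim_equal_get_hand_count : Prop := ∀ (hand : String) (count_check : Int), Dom_get_hand_count hand count_check → Spec_get_hand_count hand count_check (get_hand_count hand count_check)

-- ===== LEMMAS AND PROOFS =====

-- ===== VERDICT (by name: the statement is the Claim_ definition above) =====
theorem ghcInner_eq (hand : List Char) (c1 : Char) :
    ghcInner hand c1 = (hand.count c1 : Int) := by
  have h : ∀ (l : List Char) (acc : Int),
      l.foldl (fun count c2 => if c1 == c2 then count + 1 else count) acc
        = acc + (l.count c1 : Int) := by
    intro l
    induction l with
    | nil => simp
    | cons x xs ih =>
      intro acc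
      by_cases hx : (c1 == x) = true
      · have hx' : (x == c1) = true := by
          rw [beq_iff_eq] at hx ⊢; exact hx.symm
        rw [List.foldl_cons, if_pos hx, ih, List.count_cons, if_pos hx']
        push_cast; ring
      · have hx' : ¬ (x == c1) = true := by
          rw [beq_iff_eq] at hx ⊢; exact fun h => hx h.symm
        rw [List.foldl_cons, if_neg hx, ih, List.count_cons, if_neg hx']
        push_cast; ring
  simpa [ghcInner] using h hand 0

theorem ghcOuter_any (hand : List Char) (cc : Int) (l : List Char) :
    ghcOuter hand cc l = l.any (fun c1 => (hand.count c1 : Int) == cc) := by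
  induction l with
  | nil => rfl
  | cons x xs ih =>
    simp only [ghcOuter, ghcInner_eq, List.any_cons, ih]
    by_cases h : (hand.count x : Int) = cc <;> simp [h]

theorem get_hand_count_spec : Claim_equal_get_hand_count := by
  intro hand cc _
  unfold Spec_get_hand_count get_hand_count get_hand_count_alt
  rw [ghcOuter_any, PySem.Dict.foldl_insert_getD_add_one_eq_counter]
  have hv : (PySem.Dict.counter hand.toList).values
      = (PySem.Set.ofList hand.toList).map (fun k => (hand.toList.count k : Int)) := by
    simp [PySem.Dict.values, PySem.Dict.items_counter, List.map_map, Function.comp]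
  simp only [hv]
  apply Bool.eq_iff_iff.2
  simp only [List.any_eq_true, List.contains_eq_mem, List.mem_map, beq_iff_eq,
    decide_eq_true_eq, PySem.Set.mem_ofList]
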